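-- pv_equiv track=rewrite | github.com/octodns/octodns-powerdns | octodns_powerdns/__init__.py | _escape_unescaped_semicolons
-- ===== SOURCE A (Python) =====
-- def _escape_unescaped_semicolons(value):
--     pieces = value.split(';')
--     if len(pieces) == 1:
--         return value
--     last = pieces.pop()
--     joined = ';'.join([p if p and p[-1] == '\\' else f'{p}\\' for p in pieces])
--     ret = f'{joined};{last}'
--     return ret
-- ===== SOURCE B (Python) =====
-- def _escape_unescaped_semicolons(value):
--     # Single left-to-right scan: escape each ';' unless the previously
--     # emitted character is a backslash (empty buffer counts as not-backslash).
--     out = []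
--     for ch in value:
--         if ch == ';' and (not out or out[-1] != '\\'):
--             out.append('\\')
--         out.append(ch)
--     return ''.join(out)
-- ===== Notes on version B (the rewrite author's own statement) =====
-- stated objective: alternative
-- what changed: Replaced the split-on-';'/pop/comprehension/join pipeline with a single left-to-right character scan that appends into a buffer, inserting a backslash before a ';' whenever the last emitted character is not a backslash.
import Mathlib
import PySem

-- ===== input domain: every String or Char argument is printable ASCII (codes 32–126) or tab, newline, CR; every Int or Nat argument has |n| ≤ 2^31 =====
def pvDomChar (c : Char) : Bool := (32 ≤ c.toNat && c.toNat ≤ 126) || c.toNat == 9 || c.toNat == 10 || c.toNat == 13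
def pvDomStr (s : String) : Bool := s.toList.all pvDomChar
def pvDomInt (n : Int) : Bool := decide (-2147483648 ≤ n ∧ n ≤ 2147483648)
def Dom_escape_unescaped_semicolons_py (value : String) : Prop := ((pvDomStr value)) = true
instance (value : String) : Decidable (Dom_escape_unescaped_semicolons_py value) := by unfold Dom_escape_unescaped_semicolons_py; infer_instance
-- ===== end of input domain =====

-- B replaces A's split-on-';'/pop/join pipeline with a single left-to-right
-- character scan over the string (alternative decomposition, same cost).


-- ===== PORT A =====
-- `p if p and p[-1] == '\\' else f'{p}\\'` (the comprehension's body)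
def pvEsc (p : List Char) : List Char :=
  if p ≠ [] ∧ PySem.List.pyGet? p (-1) = some '\\' then p else p ++ ['\\']

-- A's body on the character list (strings are ported at the List Char level)
def pvAChars (l : List Char) : List Char :=
  let pieces := PySem.Chars.splitOn l [';']
  if pieces.length = 1 then l
  else
    match PySem.List.pop? pieces with
    | none => l   -- unreachable: Python's split never returns an empty list
    | some (last, rest) =>
        PySem.Chars.join [';'] (rest.map pvEsc) ++ [';'] ++ last

def escape_unescaped_semicolons_py (value : String) : String :=
  String.ofList (pvAChars value.toList)

-- ===== PORT B =====
-- loop body: if ch == ';' and (not out or out[-1] != '\\'): out.append('\\'); out.append(ch)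
def pvBStep (out : List Char) (ch : Char) : List Char :=
  if ch = ';' ∧ (out = [] ∨ PySem.List.pyGet? out (-1) ≠ some '\\') then
    out ++ ['\\'] ++ [ch]
  else
    out ++ [ch]

def escape_unescaped_semicolons_py_alt (value : String) : String :=
  String.ofList (value.toList.foldl pvBStep [])

-- ===== PRECONDITION & SPEC =====
def Spec_escape_unescaped_semicolons_py (value : String) (out : String) : Prop := out = escape_unescaped_semicolons_py_alt value
instance (value : String) (out : String) : Decidable (Spec_escape_unescaped_semicolons_py value out) := by unfold Spec_escape_unescaped_semicolons_py; infer_instance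

-- ===== CLAIM (what is proved, stated in full; the proofs are below) =====
def Claim_equal_escape_unescaped_semicolons_py : Prop := ∀ (value : String), Dom_escape_unescaped_semicolons_py value → Spec_escape_unescaped_semicolons_py value (escape_unescaped_semicolons_py value)

-- ===== LEMMAS AND PROOFS =====

-- structural version of split(';')
def pvSplitSemi : List Char → List (List Char)
  | [] => [[]]
  | c :: rest => if c = ';' then [] :: pvSplitSemi rest
                 else (pvSplitSemi rest).modifyHead (c :: ·)

-- the scan's meaning: pvG pb l escapes every ';' whose predecessor is not a backslash
-- (pb = "previous character is a backslash"; false at the start of the string)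
def pvG : Bool → List Char → List Char
  | _, [] => []
  | pb, c :: rest =>
      if c = ';' ∧ pb = false then '\\' :: ';' :: pvG false rest
      else c :: pvG (decide (c = '\\')) rest

lemma pvSplitSemi_ne_nil (l : List Char) : pvSplitSemi l ≠ [] := by
  cases l with
  | nil => simp [pvSplitSemi]
  | cons c rest =>
      simp only [pvSplitSemi]
      split
      · simp
      · cases h : pvSplitSemi rest with
        | nil => exact absurd h (pvSplitSemi_ne_nil rest)
        | cons q qs => simp

lemma pvSplitSemi_join (l : List Char) :
    PySem.Chars.join [';'] (pvSplitSemi l) = l := by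
  induction l with
  | nil => rfl
  | cons c rest ih =>
      cases hq : pvSplitSemi rest with
      | nil => exact absurd hq (pvSplitSemi_ne_nil rest)
      | cons q qs =>
        rw [hq] at ih
        by_cases hc : c = ';'
        · subst hc
          have hs : pvSplitSemi (';' :: rest) = [] :: q :: qs := by simp [pvSplitSemi, hq]
          rw [hs, PySem.Chars.join_cons_cons, ih]
          rfl
        · simp only [pvSplitSemi, if_neg hc, hq, List.modifyHead_cons]
          cases qs with
          | nil => rw [PySem.Chars.join_singleton] at ih ⊢; rw [ih]
          | cons q2 qs2 =>
              rw [PySem.Chars.join_cons_cons] at ih ⊢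
              rw [← ih]; simp

lemma pvGo_spec (fuel : Nat) : ∀ (l cur : List Char) (acc : List (List Char)),
    l.length ≤ fuel →
    PySem.Chars.splitOn.go [';'] fuel l cur acc
      = acc.reverse ++ (pvSplitSemi l).modifyHead (cur.reverse ++ ·) := by
  induction fuel with
  | zero =>
      intro l cur acc h
      have hl : l = [] := List.eq_nil_of_length_eq_zero (Nat.le_zero.mp h)
      subst hl
      rw [PySem.Chars.splitOn.go]
      simp [pvSplitSemi]
  | succ fuel ih =>
      intro l cur acc h
      cases l with
      | nil =>
          rw [PySem.Chars.splitOn.go] <;> simp [pvSplitSemi]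
      | cons c rest =>
          rw [PySem.Chars.splitOn.go]
          by_cases hc : c = ';'
          · subst hc
            have hp : [';'].isPrefixOf (';' :: rest) = true := by simp [List.isPrefixOf]
            simp only [hp, if_true, List.length_cons, List.length_nil, List.drop_succ_cons,
              List.drop_zero]
            rw [ih rest [] (cur.reverse :: acc) (by simpa using Nat.le_of_succ_le_succ h)]
            cases hq : pvSplitSemi rest with
            | nil => exact absurd hq (pvSplitSemi_ne_nil rest)
            | cons q qs => simp [pvSplitSemi, hq]
          · have hp : [';'].isPrefixOf (c :: rest) = false := by
              simp [List.isPrefixOf]; exact fun hh => absurd hh.symm hc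
            simp only [hp, Bool.false_eq_true, if_false]
            rw [ih rest (c :: cur) acc (by simpa using Nat.le_of_succ_le_succ h)]
            cases hq : pvSplitSemi rest with
            | nil => exact absurd hq (pvSplitSemi_ne_nil rest)
            | cons q qs => simp [pvSplitSemi, hq, hc]

lemma pvSplitOn_eq (l : List Char) : PySem.Chars.splitOn l [';'] = pvSplitSemi l := by
  rw [PySem.Chars.splitOn, pvGo_spec (l.length + 1) l [] [] (Nat.le_succ _)]
  cases hq : pvSplitSemi l with
  | nil => exact absurd hq (pvSplitSemi_ne_nil l)
  | cons q qs => simp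

lemma pvSplitSemi_no {l : List Char} (h : (';' : Char) ∉ l) : pvSplitSemi l = [l] := by
  induction l with
  | nil => rfl
  | cons c rest ih =>
      simp only [List.mem_cons, not_or] at h
      simp [pvSplitSemi, Ne.symm h.1, ih h.2]

lemma pvSplitSemi_app {a : List Char} (h : (';' : Char) ∉ a) (rest : List Char) :
    pvSplitSemi (a ++ ';' :: rest) = a :: pvSplitSemi rest := by
  induction a with
  | nil => simp [pvSplitSemi]
  | cons c a' ih =>
      simp only [List.mem_cons, not_or] at h
      simp [pvSplitSemi, Ne.symm h.1, ih h.2]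

lemma pvG_no {l : List Char} (h : (';' : Char) ∉ l) (pb : Bool) : pvG pb l = l := by
  induction l generalizing pb with
  | nil => rfl
  | cons c rest ih =>
      simp only [List.mem_cons, not_or] at h
      simp [pvG, Ne.symm h.1, ih h.2]

lemma pvGet_neg_one (a : List Char) : PySem.List.pyGet? a (-1) = a.getLast? := by
  cases a with
  | nil => rfl
  | cons x xs => simp [PySem.List.pyGet?, PySem.List.pyIdx?, List.getLast?_eq_getElem?]

lemma pvEsc_eq (a : List Char) :
    pvEsc a = if a.getLast? = some '\\' then a else a ++ ['\\'] := by
  unfold pvEsc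
  rw [pvGet_neg_one]
  cases a with
  | nil => simp
  | cons x xs => simp

-- the "previous char is a backslash" flag after consuming a, starting from pb
def pvLastB (a : List Char) (pb : Bool) : Bool :=
  match a.getLast? with
  | some c => decide (c = '\\')
  | none => pb

lemma pvG_split {a : List Char} (h : (';' : Char) ∉ a) (rest : List Char) (pb : Bool) :
    pvG pb (a ++ ';' :: rest)
      = a ++ (if pvLastB a pb then ';' :: pvG false rest else '\\' :: ';' :: pvG false rest) := by
  induction a generalizing pb with
  | nil =>
      cases pb with
      | false => simp [pvG, pvLastB]
      | true => simp [pvG, pvLastB]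
  | cons c a' ih =>
      simp only [List.mem_cons, not_or] at h
      have hlb : pvLastB (c :: a') pb = pvLastB a' (decide (c = '\\')) := by
        cases ha' : a' with
        | nil => simp [pvLastB]
        | cons y ys =>
            unfold pvLastB
            rcases hg : (y :: ys).getLast? with _ | z
            · simp at hg
            · simp [List.getLast?_cons_cons, hg]
      simp only [List.cons_append, pvG, Ne.symm h.1, false_and, ih h.2, hlb]
      simp

lemma pvA_step {a : List Char} (h : (';' : Char) ∉ a) (rest : List Char) :
    pvAChars (a ++ ';' :: rest) = pvEsc a ++ ';' :: pvAChars rest := by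
  rcases List.eq_nil_or_concat (pvSplitSemi rest) with hq | ⟨init, lastq, hq⟩
  · exact absurd hq (pvSplitSemi_ne_nil rest)
  · rw [List.concat_eq_append] at hq
    have hpop : PySem.List.pop? (a :: (init ++ [lastq])) = some (lastq, a :: init) := by
      rw [← List.cons_append]; exact PySem.List.pop?_last _ _
    simp only [pvAChars, pvSplitOn_eq, pvSplitSemi_app h, hq, hpop]
    cases init with
    | nil =>
        have hrest : lastq = rest := by
          have hj := pvSplitSemi_join rest
          rw [hq, List.nil_append, PySem.Chars.join_singleton] at hj
          exact hj
        simp [hrest]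
    | cons i0 it =>
        have hpop2 : PySem.List.pop? ((i0 :: it) ++ [lastq]) = some (lastq, i0 :: it) :=
          PySem.List.pop?_last _ _
        simp only [hpop2, List.length_cons, List.length_append]
        rw [if_neg (by simp), if_neg (by simp [Nat.add_comm])]
        simp only [List.map_cons]
        rw [PySem.Chars.join_cons_cons]
        simp

lemma pvB_fold : ∀ (l acc : List Char),
    l.foldl pvBStep acc = acc ++ pvG (decide (acc.getLast? = some '\\')) l := by
  intro l
  induction l with
  | nil => intro acc; simp [pvG]
  | cons c rest ih =>
      intro acc
      rw [List.foldl_cons, ih]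
      by_cases hcond : c = ';' ∧ (acc = [] ∨ PySem.List.pyGet? acc (-1) ≠ some '\\')
      · obtain ⟨hc, hpb⟩ := hcond; subst hc
        have hpb' : decide (acc.getLast? = some '\\') = false := by
          rcases hpb with h0 | h0
          · subst h0; simp
          · rw [pvGet_neg_one] at h0; simp [h0]
        have hstep : pvBStep acc ';' = acc ++ ['\\'] ++ [';'] := by
          simp [pvBStep, hpb]
        rw [hstep]
        have hlast : ((acc ++ ['\\']) ++ [';']).getLast? = some ';' := by simp
        rw [hlast]
        simp [pvG, hpb']
      · have hstep : pvBStep acc c = acc ++ [c] := by simp [pvBStep, hcond]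
        rw [hstep]
        have hlast : (acc ++ [c]).getLast? = some c := by simp
        rw [hlast]
        have : ¬ (c = ';' ∧ decide (acc.getLast? = some '\\') = false) := by
          intro ⟨h1, h2⟩
          apply hcond
          refine ⟨h1, ?_⟩
          rcases hacc : acc with _ | _
          · exact Or.inl rfl
          · right
            rw [pvGet_neg_one, ← hacc]
            simp at h2
            intro hx; rw [hx] at h2; simp at h2
        conv_rhs => rw [pvG]
        rw [if_neg this]
        simp

lemma pvEscFinal (a G : List Char) :
    (if a.getLast? = some '\\' then a else a ++ ['\\']) ++ ';' :: G
      = a ++ (if pvLastB a false then ';' :: G else '\\' :: ';' :: G) := by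
  unfold pvLastB
  rcases hgl : a.getLast? with _ | z
  · simp
  · by_cases hz : z = '\\' <;> simp [hz]

lemma pvMain : ∀ (n : Nat) (l : List Char), l.length ≤ n → pvAChars l = pvG false l := by
  intro n
  induction n with
  | zero =>
      intro l h
      have hl : l = [] := List.eq_nil_of_length_eq_zero (Nat.le_zero.mp h)
      subst hl; rfl
  | succ n ih =>
      intro l h
      by_cases hm : (';' : Char) ∈ l
      · have hld : l = l.takeWhile (· ≠ ';') ++ l.dropWhile (· ≠ ';') :=
          (List.takeWhile_append_dropWhile).symm
        have hna : (';' : Char) ∉ l.takeWhile (· ≠ ';') := by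
          intro hx
          have := List.mem_takeWhile_imp hx
          simp at this
        have hdne : l.dropWhile (· ≠ ';') ≠ [] := by
          intro h0
          rw [h0, List.append_nil] at hld
          exact hna (hld ▸ hm)
        obtain ⟨c, restd, hcr⟩ := List.exists_cons_of_ne_nil hdne
        have hc : c = ';' := by
          have hh := List.head_dropWhile_not (fun x : Char => decide (x ≠ ';')) hdne
          simp only [hcr, List.head_cons] at hh
          simpa using hh
        subst hc
        rw [hcr] at hld
        have hlen : restd.length ≤ n := by
          have := congrArg List.length hld
          simp at this
          omega
        rw [hld, pvA_step hna, ih restd hlen, pvG_split hna restd false, pvEsc_eq,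
          pvEscFinal]
      · rw [pvG_no hm]
        unfold pvAChars
        rw [pvSplitOn_eq, pvSplitSemi_no hm]
        simp

-- ===== VERDICT (by name: the statement is the Claim_ definition above) =====
theorem escape_unescaped_semicolons_py_spec : Claim_equal_escape_unescaped_semicolons_py := by
  intro value _
  unfold Spec_escape_unescaped_semicolons_py escape_unescaped_semicolons_py escape_unescaped_semicolons_py_alt
  rw [pvB_fold, pvMain value.toList.length value.toList le_rfl]
  simp
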